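-- pv_equiv track=rewrite | github.com/gzglss/study-notes | Data-structure-and-algorithm/多数组求指定和.py | mutilarrtarget
-- ===== SOURCE A (Python) =====
-- def mutilarrtarget(a,b,c,target):
-- 	dic_a,dic_b,dic_c,res={},{},{},0
-- 	for i in range(len(a)):
-- 		if a[i] not in dic_a:
-- 			dic_a[a[i]]=1
-- 		else:
-- 			dic_a[a[i]]+=1
-- 	for i in range(len(b)):
-- 		if b[i] not in dic_b:
-- 			dic_b[b[i]]=1
-- 		else:
-- 			dic_b[b[i]]+=1
-- 	for i in range(len(c)):
-- 		if c[i] not in dic_c: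
-- 			dic_c[c[i]]=1
-- 		else:
-- 			dic_c[c[i]]+=1
-- 	for k1,v1 in dic_a.items():
-- 		for k2,v2 in dic_b.items():
-- 			e=64-k1-k2
-- 			d=dic_c.get(e)
-- 			if d:
-- 				res+=v1*v2*d
-- 	return res
-- ===== SOURCE B (Python) =====
-- def mutilarrtarget(a, b, c, target):
--     cnt_a = {}
--     for x in a:
--         cnt_a[x] = cnt_a.get(x, 0) + 1
--     cnt_b = {}
--     for y in b:
--         cnt_b[y] = cnt_b.get(y, 0) + 1
--     # pair-sum distribution of a x b
--     ab = {}
--     for k1, v1 in cnt_a.items():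
--         for k2, v2 in cnt_b.items():
--             s = k1 + k2
--             ab[s] = ab.get(s, 0) + v1 * v2
--     cnt_c = {}
--     for z in c:
--         cnt_c[z] = cnt_c.get(z, 0) + 1
--     res = 0
--     for z, vz in cnt_c.items():
--         res += ab.get(64 - z, 0) * vz
--     return res
-- ===== Notes on version B (the rewrite author's own statement) =====
-- stated objective: alternative
-- what changed: B precomputes a pair-sum distribution dict of a×b from the two counters and then combines it with the counter of c in one single pass over c's distinct values, instead of A's nested a×b items loop that looks each residual up in the c counter; the counting loops use dict.get accumulation instead of A's index-loop membership tests.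
import Mathlib
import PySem

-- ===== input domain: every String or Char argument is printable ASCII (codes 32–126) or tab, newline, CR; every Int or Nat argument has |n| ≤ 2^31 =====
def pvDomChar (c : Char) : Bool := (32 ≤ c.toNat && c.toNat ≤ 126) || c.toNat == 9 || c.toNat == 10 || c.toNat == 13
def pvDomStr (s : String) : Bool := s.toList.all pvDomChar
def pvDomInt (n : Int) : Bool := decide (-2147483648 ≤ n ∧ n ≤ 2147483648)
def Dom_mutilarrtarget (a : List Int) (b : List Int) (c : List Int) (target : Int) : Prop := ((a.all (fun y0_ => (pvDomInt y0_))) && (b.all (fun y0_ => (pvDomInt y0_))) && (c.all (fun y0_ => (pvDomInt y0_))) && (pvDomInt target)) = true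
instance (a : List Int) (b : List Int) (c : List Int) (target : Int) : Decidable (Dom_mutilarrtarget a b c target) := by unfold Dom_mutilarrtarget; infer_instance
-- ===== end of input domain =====

-- B replaces A's nested lookup of each pair-sum in the counter of c by a precomputed
-- pair-sum distribution of a×b followed by one pass over the distinct values of c
-- (alternative decomposition; same asymptotic cost).

-- ===== PORT A =====
-- literal transliteration of A: three manual counting loops over indices, then a
-- nested loop over the items of the a- and b-counters looking up 64-k1-k2 in the c-counter.
def mutilarrtarget (a : List Int) (b : List Int) (c : List Int) (target : Int) : Int :=
  let dic_a := (PySem.List.pyRange 0 (PySem.List.len a) 1).foldl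
    (fun d i =>
      if d.contains (PySem.List.pyGetD a i 0) = false
      then d.insert (PySem.List.pyGetD a i 0) 1
      else d.insert (PySem.List.pyGetD a i 0) (d.getD (PySem.List.pyGetD a i 0) 0 + 1))
    (PySem.Dict.empty : PySem.Dict Int Int)
  let dic_b := (PySem.List.pyRange 0 (PySem.List.len b) 1).foldl
    (fun d i =>
      if d.contains (PySem.List.pyGetD b i 0) = false
      then d.insert (PySem.List.pyGetD b i 0) 1
      else d.insert (PySem.List.pyGetD b i 0) (d.getD (PySem.List.pyGetD b i 0) 0 + 1))
    (PySem.Dict.empty : PySem.Dict Int Int)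
  let dic_c := (PySem.List.pyRange 0 (PySem.List.len c) 1).foldl
    (fun d i =>
      if d.contains (PySem.List.pyGetD c i 0) = false
      then d.insert (PySem.List.pyGetD c i 0) 1
      else d.insert (PySem.List.pyGetD c i 0) (d.getD (PySem.List.pyGetD c i 0) 0 + 1))
    (PySem.Dict.empty : PySem.Dict Int Int)
  dic_a.items.foldl (fun res p1 =>
    dic_b.items.foldl (fun res p2 =>
      match dic_c.get? (64 - p1.1 - p2.1) with       -- e = 64-k1-k2; d = dic_c.get(e)
      | none => res
      | some d => if d ≠ 0 then res + p1.2 * p2.2 * d else res)   -- 'if d:' truthiness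
    res) 0

-- ===== PORT B =====
-- literal transliteration of Source B: counters via dict.get, the pair-sum table ab, one pass over cnt_c.
def mutilarrtarget_alt (a : List Int) (b : List Int) (c : List Int) (target : Int) : Int :=
  let cntA := a.foldl (fun d x => d.insert x (d.getD x 0 + 1)) (PySem.Dict.empty : PySem.Dict Int Int)
  let cntB := b.foldl (fun d y => d.insert y (d.getD y 0 + 1)) (PySem.Dict.empty : PySem.Dict Int Int)
  let ab := cntA.items.foldl (fun d p1 =>
      cntB.items.foldl (fun d p2 =>
        d.insert (p1.1 + p2.1) (d.getD (p1.1 + p2.1) 0 + p1.2 * p2.2)) d) (PySem.Dict.empty : PySem.Dict Int Int)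
  let cntC := c.foldl (fun d z => d.insert z (d.getD z 0 + 1)) (PySem.Dict.empty : PySem.Dict Int Int)
  cntC.items.foldl (fun res p => res + ab.getD (64 - p.1) 0 * p.2) 0

-- ===== PRECONDITION & SPEC =====
def Spec_mutilarrtarget (a : List Int) (b : List Int) (c : List Int) (target : Int) (out : Int) : Prop := out = mutilarrtarget_alt a b c target
instance (a : List Int) (b : List Int) (c : List Int) (target : Int) (out : Int) : Decidable (Spec_mutilarrtarget a b c target out) := by unfold Spec_mutilarrtarget; infer_instance

-- ===== CLAIM (what is proved, stated in full; the proofs are below) =====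
def Claim_equal_mutilarrtarget : Prop := ∀ (a : List Int) (b : List Int) (c : List Int) (target : Int), Dom_mutilarrtarget a b c target → Spec_mutilarrtarget a b c target (mutilarrtarget a b c target)

-- ===== LEMMAS AND PROOFS =====

-- summing an indicator over a Nodup list containing x picks out f x
theorem pv_sum_map_ite_single (l : List Int) (x : Int) (f : Int → Int)
    (hnd : l.Nodup) (hx : x ∈ l) :
    (l.map (fun k => if k = x then f k else 0)).sum = f x := by
  induction l with
  | nil => cases hx
  | cons y l ih =>
    rcases List.nodup_cons.mp hnd with ⟨hy, hnd'⟩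
    by_cases hxy : y = x
    · subst hxy
      have hz : ∀ k ∈ l, (if k = y then f k else 0) = 0 := by
        intro k hk
        exact if_neg (by rintro rfl; exact hy hk)
      simp [List.map_congr_left hz]
    · have hx' : x ∈ l := by
        rcases List.mem_cons.mp hx with h | h
        · exact absurd h.symm hxy
        · exact h
      simp [hxy, ih hnd' hx']

-- sum over a Nodup superset of the distinct values, weighted by multiplicity = plain sum over the list
theorem pv_sum_count_mul (l : List Int) (xs : List Int) (f : Int → Int)
    (hnd : l.Nodup) (hsub : ∀ x ∈ xs, x ∈ l) :
    (l.map (fun k => (xs.count k : Int) * f k)).sum = (xs.map f).sum := by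
  induction xs with
  | nil => simp
  | cons x xs ih =>
    have hstep : ∀ k ∈ l, ((x :: xs).count k : Int) * f k
        = (xs.count k : Int) * f k + (if k = x then f k else 0) := by
      intro k _
      rw [List.count_cons]
      push_cast
      by_cases h : k = x
      · subst h; simp [add_mul]
      · have : ¬ ((x == k) = true) := by simpa [beq_iff_eq] using fun e => h e.symm
        simp [this, h]
    rw [List.map_congr_left hstep, PySem.List.sum_map_add_int,
        ih (fun y hy => hsub y (List.mem_cons_of_mem _ hy)),
        pv_sum_map_ite_single l x f hnd (hsub x (List.mem_cons_self))]
    simp [add_comm]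

-- summing p.2 * f p.1 over the items of a counter = summing f over the underlying list
theorem pv_counter_items_sum (xs : List Int) (f : Int → Int) :
    ((PySem.Dict.counter xs).items.map (fun p => p.2 * f p.1)).sum = (xs.map f).sum := by
  rw [PySem.Dict.items_counter, List.map_map]
  exact pv_sum_count_mul _ xs f (PySem.Set.nodup_ofList xs)
    (fun x hx => (PySem.Set.mem_ofList xs x).mpr hx)

-- A's manual counting loop builds exactly the counter
theorem pv_loopA_eq_counter (xs : List Int) :
    (PySem.List.pyRange 0 (PySem.List.len xs) 1).foldl
      (fun d i =>
        if d.contains (PySem.List.pyGetD xs i 0) = false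
        then d.insert (PySem.List.pyGetD xs i 0) 1
        else d.insert (PySem.List.pyGetD xs i 0) (d.getD (PySem.List.pyGetD xs i 0) 0 + 1))
      PySem.Dict.empty = PySem.Dict.counter xs := by
  refine (PySem.List.foldl_pyRange_zero_pyGetD xs 0
      (fun (d : PySem.Dict Int Int) (x : Int) =>
        if d.contains x = false then d.insert x 1 else d.insert x (d.getD x 0 + 1))
      PySem.Dict.empty).trans ?_
  have hfn : (fun (d : PySem.Dict Int Int) (x : Int) =>
      if d.contains x = false then d.insert x 1 else d.insert x (d.getD x 0 + 1))
      = fun d x => d.insert x (d.getD x 0 + 1) := by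
    funext d x
    by_cases h : d.contains x = false
    · simp [h, PySem.Dict.getD_of_not_contains d 0 h]
    · simp [h]
  rw [hfn, PySem.Dict.foldl_insert_getD_add_one_eq_counter]

-- swapping two list sums
theorem pv_sum_swap (l1 l2 : List Int) (g : Int → Int → Int) :
    (l1.map (fun x => (l2.map (fun y => g x y)).sum)).sum
      = (l2.map (fun y => (l1.map (fun x => g x y)).sum)).sum := by
  induction l1 with
  | nil => simp
  | cons x l1 ih =>
    simp only [List.map_cons, List.sum_cons, ih, ← PySem.List.sum_map_add_int]

-- a count as an indicator sum
theorem pv_count_eq_sum (xs : List Int) (t : Int) :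
    ((xs.count t : Nat) : Int) = (xs.map (fun z => if z = t then 1 else 0)).sum := by
  have : (xs.map (fun z => if z = t then (1:Int) else 0)).sum
      = ((xs.countP (fun z => z == t) : Nat) : Int) := by
    rw [← PySem.List.sum_map_ite_one_zero (fun z => z == t) xs]
    simp
  rw [this, List.count]

-- getD after one insert-accumulate loop
theorem pv_acc_getD (l : List (Int × Int)) (d : PySem.Dict Int Int)
    (key w : Int × Int → Int) (q : Int) :
    (l.foldl (fun d p => d.insert (key p) (d.getD (key p) 0 + w p)) d).getD q 0
      = d.getD q 0 + (l.map (fun p => if key p = q then w p else 0)).sum := by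
  induction l generalizing d with
  | nil => simp
  | cons p l ih =>
    simp only [List.foldl_cons, List.map_cons, List.sum_cons, ih,
      PySem.Dict.getD_insert]
    by_cases h : q = key p
    · rw [if_pos h, if_pos h.symm, h]; ring
    · rw [if_neg h, if_neg (fun e => h e.symm)]; ring

-- the nested pair-sum build of B, as a double sum
theorem pv_ab_getD (lA lB : List (Int × Int)) (d : PySem.Dict Int Int) (q : Int) :
    (lA.foldl (fun d p1 =>
        lB.foldl (fun d p2 =>
          d.insert (p1.1 + p2.1) (d.getD (p1.1 + p2.1) 0 + p1.2 * p2.2)) d) d).getD q 0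
      = d.getD q 0
        + (lA.map (fun p1 =>
            (lB.map (fun p2 => if p1.1 + p2.1 = q then p1.2 * p2.2 else 0)).sum)).sum := by
  induction lA generalizing d with
  | nil => simp
  | cons p1 lA ih =>
    simp only [List.foldl_cons, List.map_cons, List.sum_cons, ih]
    rw [pv_acc_getD lB d (fun p2 => p1.1 + p2.1) (fun p2 => p1.2 * p2.2) q]
    ring

-- A's value as a double list sum over a and b of counts in c
theorem pv_A_sum (a b c : List Int) (target : Int) :
    mutilarrtarget a b c target
      = (a.map (fun x => (b.map (fun y => ((c.count (64 - x - y) : Nat) : Int))).sum)).sum := by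
  simp only [mutilarrtarget]
  rw [pv_loopA_eq_counter a, pv_loopA_eq_counter b, pv_loopA_eq_counter c]
  have hbody : (fun (res : Int) (p1 : Int × Int) =>
      (PySem.Dict.counter b).items.foldl (fun res p2 =>
        match (PySem.Dict.counter c).get? (64 - p1.1 - p2.1) with
        | none => res
        | some d => if d ≠ 0 then res + p1.2 * p2.2 * d else res) res)
      = fun res p1 => res + p1.2 * (b.map (fun y => ((c.count (64 - p1.1 - y) : Nat) : Int))).sum := by
    funext res p1
    have hin : (fun (res : Int) (p2 : Int × Int) =>
        match (PySem.Dict.counter c).get? (64 - p1.1 - p2.1) with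
        | none => res
        | some d => if d ≠ 0 then res + p1.2 * p2.2 * d else res)
        = fun res p2 => res + p2.2 * (p1.2 * ((c.count (64 - p1.1 - p2.1) : Nat) : Int)) := by
      funext res p2
      have hg : (PySem.Dict.counter c).getD (64 - p1.1 - p2.1) 0
          = ((c.count (64 - p1.1 - p2.1) : Nat) : Int) :=
        PySem.Dict.getD_counter c _
      rw [PySem.Dict.getD_eq_get?_getD] at hg
      cases hget : (PySem.Dict.counter c).get? (64 - p1.1 - p2.1) with
      | none =>
        simp only [hget, Option.getD_none] at hg
        simp [← hg]
      | some d =>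
        simp only [hget, Option.getD_some] at hg
        by_cases hd : d = 0
        · simp [hd, ← hg]
        · simp only [hd, ne_eq, not_false_eq_true, if_true]
          rw [hg]; ring
    rw [hin, PySem.List.foldl_add,
        pv_counter_items_sum b (fun y => p1.2 * ((c.count (64 - p1.1 - y) : Nat) : Int)),
        List.sum_map_mul_left]
  rw [hbody, PySem.List.foldl_add,
      pv_counter_items_sum a (fun x => (b.map (fun y => ((c.count (64 - x - y) : Nat) : Int))).sum)]
  simp

-- B's value as a triple indicator sum
theorem pv_B_sum (a b c : List Int) (target : Int) :
    mutilarrtarget_alt a b c target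
      = (c.map (fun z => (a.map (fun x =>
          (b.map (fun y => if x + y = 64 - z then (1:Int) else 0)).sum)).sum)).sum := by
  simp only [mutilarrtarget_alt]
  rw [PySem.Dict.foldl_insert_getD_add_one_eq_counter a,
      PySem.Dict.foldl_insert_getD_add_one_eq_counter b,
      PySem.Dict.foldl_insert_getD_add_one_eq_counter c]
  have hbody : (fun (res : Int) (p : Int × Int) =>
      res + ((PySem.Dict.counter a).items.foldl (fun d p1 =>
          (PySem.Dict.counter b).items.foldl (fun d p2 =>
            d.insert (p1.1 + p2.1) (d.getD (p1.1 + p2.1) 0 + p1.2 * p2.2)) d)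
          PySem.Dict.empty).getD (64 - p.1) 0 * p.2)
      = fun res p => res + p.2 * (a.map (fun x =>
          (b.map (fun y => if x + y = 64 - p.1 then (1:Int) else 0)).sum)).sum := by
    funext res p
    rw [pv_ab_getD ((PySem.Dict.counter a).items) ((PySem.Dict.counter b).items)
        PySem.Dict.empty (64 - p.1)]
    have hin : ∀ p1 : Int × Int,
        ((PySem.Dict.counter b).items.map
          (fun p2 => if p1.1 + p2.1 = 64 - p.1 then p1.2 * p2.2 else 0)).sum
        = p1.2 * (b.map (fun y => if p1.1 + y = 64 - p.1 then (1:Int) else 0)).sum := by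
      intro p1
      have hfn : (fun (p2 : Int × Int) => if p1.1 + p2.1 = 64 - p.1 then p1.2 * p2.2 else 0)
          = fun p2 => p2.2 * (p1.2 * (if p1.1 + p2.1 = 64 - p.1 then (1:Int) else 0)) := by
        funext p2
        by_cases h : p1.1 + p2.1 = 64 - p.1 <;> simp [h] <;> ring
      rw [hfn, pv_counter_items_sum b
          (fun y => p1.2 * (if p1.1 + y = 64 - p.1 then (1:Int) else 0)),
          List.sum_map_mul_left]
    have hmap : ((PySem.Dict.counter a).items.map (fun p1 =>
        ((PySem.Dict.counter b).items.map
          (fun p2 => if p1.1 + p2.1 = 64 - p.1 then p1.2 * p2.2 else 0)).sum))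
        = (PySem.Dict.counter a).items.map (fun p1 =>
            p1.2 * (b.map (fun y => if p1.1 + y = 64 - p.1 then (1:Int) else 0)).sum) :=
      List.map_congr_left (fun p1 _ => hin p1)
    rw [hmap, pv_counter_items_sum a
        (fun x => (b.map (fun y => if x + y = 64 - p.1 then (1:Int) else 0)).sum)]
    simp [mul_comm]
  rw [hbody, PySem.List.foldl_add,
      pv_counter_items_sum c (fun z => (a.map (fun x =>
        (b.map (fun y => if x + y = 64 - z then (1:Int) else 0)).sum)).sum)]
  simp

-- ===== VERDICT (by name: the statement is the Claim_ definition above) =====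
theorem mutilarrtarget_spec : Claim_equal_mutilarrtarget := by
  intro a b c target _
  unfold Spec_mutilarrtarget
  rw [pv_A_sum a b c target, pv_B_sum a b c target]
  have h1 : ∀ x : Int,
      (b.map (fun y => ((c.count (64 - x - y) : Nat) : Int))).sum
      = (b.map (fun y => (c.map (fun z => if x + y = 64 - z then (1:Int) else 0)).sum)).sum := by
    intro x
    refine congrArg List.sum (List.map_congr_left (fun y _ => ?_))
    rw [pv_count_eq_sum c (64 - x - y)]
    refine congrArg List.sum (List.map_congr_left (fun z _ => ?_))
    by_cases h : z = 64 - x - y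
    · rw [if_pos h, if_pos (by omega)]
    · rw [if_neg h, if_neg (by omega)]
  have h2 : (a.map (fun x => (b.map (fun y => ((c.count (64 - x - y) : Nat) : Int))).sum)).sum
      = (a.map (fun x => (c.map (fun z =>
          (b.map (fun y => if x + y = 64 - z then (1:Int) else 0)).sum)).sum)).sum := by
    refine congrArg List.sum (List.map_congr_left (fun x _ => ?_))
    rw [h1 x, pv_sum_swap b c (fun y z => if x + y = 64 - z then (1:Int) else 0)]
  rw [h2, pv_sum_swap a c (fun x z =>
      (b.map (fun y => if x + y = 64 - z then (1:Int) else 0)).sum)]
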